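-- pv_equiv track=rewrite | github.com/sligter/LambChat | src/infra/session/search_index.py | _merge_search_lines
-- ===== SOURCE A (Python) =====
-- def _merge_search_lines(base_lines: list[str], extra_lines: list[str]) -> list[str]:
--     if not base_lines:
--         return list(extra_lines)
--     if not extra_lines:
--         return list(base_lines)
--
--     max_overlap = min(len(base_lines), len(extra_lines))
--     overlap = 0
--     for size in range(max_overlap, 0, -1):
--         if base_lines[-size:] == extra_lines[:size]:
--             overlap = size
--             break
--     return [*base_lines, *extra_lines[overlap:]]
-- ===== SOURCE B (Python) =====
-- def _merge_search_lines(base_lines: list[str], extra_lines: list[str]) -> list[str]: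
--     # One pass over base_lines maintaining the set of live candidate overlap
--     # lengths (naive pattern-matching automaton), instead of A's descending
--     # nested slice comparisons.
--     m = len(extra_lines)
--     cands = []  # descending list of lengths s>=1 with base_prefix[-s:] == extra_lines[:s]
--     for x in base_lines:
--         cands = [c + 1 for c in cands + [0] if c < m and extra_lines[c] == x]
--     overlap = cands[0] if cands else 0
--     return [*base_lines, *extra_lines[overlap:]]
-- ===== Notes on version B (the rewrite author's own statement) =====
-- stated objective: faster
-- what changed: Replaces A's descending loop of full suffix/prefix slice comparisons with a single left-to-right pass over base_lines that maintains the set of live candidate overlap lengths (naive matching-automaton simulation); the answer is the largest surviving candidate.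
import Mathlib
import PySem

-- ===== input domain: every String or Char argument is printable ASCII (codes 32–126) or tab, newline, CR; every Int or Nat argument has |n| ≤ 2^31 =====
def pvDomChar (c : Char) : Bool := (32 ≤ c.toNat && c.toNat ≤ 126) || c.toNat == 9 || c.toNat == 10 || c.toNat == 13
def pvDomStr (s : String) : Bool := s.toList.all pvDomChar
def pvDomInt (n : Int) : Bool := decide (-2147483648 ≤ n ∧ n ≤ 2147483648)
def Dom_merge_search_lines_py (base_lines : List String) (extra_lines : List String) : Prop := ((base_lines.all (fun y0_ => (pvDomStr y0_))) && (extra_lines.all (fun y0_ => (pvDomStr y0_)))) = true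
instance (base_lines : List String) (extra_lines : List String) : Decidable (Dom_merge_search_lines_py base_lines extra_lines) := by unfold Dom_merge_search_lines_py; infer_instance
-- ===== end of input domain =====

-- B replaces A's descending slice-comparison loop by a single pass over base_lines
-- maintaining the live candidate overlap lengths; same return value (alternative algorithm).

-- ===== PORT A =====
-- the 'for size in range(max_overlap, 0, -1): if …: overlap = size; break' loop
def mslALoop (base_lines extra_lines : List String) : List Int → Int
  | [] => 0
  | s :: rest =>
    if PySem.List.slice base_lines (some (-s)) none = PySem.List.slice extra_lines none (some s)
    then s
    else mslALoop base_lines extra_lines rest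

def merge_search_lines_py (base_lines : List String) (extra_lines : List String) : List String :=
  if base_lines = [] then extra_lines
  else if extra_lines = [] then base_lines
  else
    let max_overlap : Int := min (base_lines.length : Int) (extra_lines.length : Int)
    let overlap : Int := mslALoop base_lines extra_lines (PySem.List.pyRange max_overlap 0 (-1))
    base_lines ++ PySem.List.slice extra_lines (some overlap) none

-- ===== PORT B =====
-- cands = [c + 1 for c in cands + [0] if c < m and extra_lines[c] == x]
def mslBStep (extra_lines : List String) (cands : List Nat) (x : String) : List Nat :=
  (cands ++ [0]).filterMap
    (fun c => if c < extra_lines.length ∧ extra_lines.getD c "" = x then some (c + 1) else none)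

def merge_search_lines_py_alt (base_lines : List String) (extra_lines : List String) : List String :=
  let cands := base_lines.foldl (mslBStep extra_lines) []
  let overlap := cands.headD 0
  base_lines ++ extra_lines.drop overlap

-- ===== PRECONDITION & SPEC =====
def Spec_merge_search_lines_py (base_lines : List String) (extra_lines : List String) (out : List String) : Prop := out = merge_search_lines_py_alt base_lines extra_lines
instance (base_lines : List String) (extra_lines : List String) (out : List String) : Decidable (Spec_merge_search_lines_py base_lines extra_lines out) := by unfold Spec_merge_search_lines_py; infer_instance

-- ===== CLAIM (what is proved, stated in full; the proofs are below) =====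
def Claim_equal_merge_search_lines_py : Prop := ∀ (base_lines : List String) (extra_lines : List String), Dom_merge_search_lines_py base_lines extra_lines → Spec_merge_search_lines_py base_lines extra_lines (merge_search_lines_py base_lines extra_lines)

-- ===== LEMMAS AND PROOFS =====

-- [j, j-1, …, 1]
def mslDesc : Nat → List Nat
  | 0 => []
  | j + 1 => (j + 1) :: mslDesc j

-- "length-s suffix of p equals length-s prefix of extra"
def mslOk (extra p : List String) (s : Nat) : Bool :=
  extra.take s == p.drop (p.length - s)


theorem mslDesc_map_succ (j : Nat) : (mslDesc j ++ [0]).map (· + 1) = mslDesc (j + 1) := by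
  induction j with
  | zero => simp [mslDesc]
  | succ j ih => simp [mslDesc] at ih ⊢; exact ih

theorem mslDesc_mem_le {j c : Nat} (h : c ∈ mslDesc j) : c ≤ j := by
  induction j with
  | zero => simp [mslDesc] at h
  | succ j ih =>
    simp [mslDesc] at h
    rcases h with h | h
    · omega
    · have := ih h; omega

theorem mslOk_zero (extra p : List String) : mslOk extra p 0 = true := by
  simp [mslOk, List.drop_length]

-- generic "shift" lemma: filtering then advancing candidates equals filtering the shifted list
theorem msl_key (f : Nat → Option Nat) (q q' : Nat → Bool) :
    ∀ l : List Nat,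
      (∀ c ∈ l, (if q c then f c else none) = if q' (c + 1) then some (c + 1) else none) →
      (l.filter q).filterMap f = (l.map (· + 1)).filter q' := by
  intro l
  induction l with
  | nil => intro _; simp
  | cons c l ih =>
    intro h
    have hc := h c (List.mem_cons_self ..)
    have hrest := ih (fun a ha => h a (List.mem_cons_of_mem _ ha))
    by_cases hq : q c = true
    · rw [if_pos hq] at hc
      cases hq' : q' (c + 1) with
      | true => simp [hq, hq', hc, hrest]
      | false => simp [hq'] at hc; simp [hq, hq', hc, hrest]
    · rw [if_neg hq] at hc
      have hq' : q' (c + 1) = false := by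
        cases hq'' : q' (c + 1)
        · rfl
        · rw [hq''] at hc; simp at hc
      simp [hq, hq', hrest]

-- pointwise: a candidate c survives the step at line x iff c+1 is an overlap of p ++ [x]
theorem msl_point (extra p : List String) (x : String) (c : Nat)
    (hc1 : c ≤ p.length) (hc2 : c ≤ extra.length) :
    (mslOk extra (p ++ [x]) (c + 1) = true) ↔
      (mslOk extra p c = true ∧ c < extra.length ∧ extra.getD c "" = x) := by
  have hdrop : (p ++ [x]).drop ((p ++ [x]).length - (c + 1)) =
      p.drop (p.length - c) ++ [x] := by
    have h1 : (p ++ [x]).length - (c + 1) = p.length - c := by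
      simp only [List.length_append, List.length_cons, List.length_nil]; omega
    rw [h1, List.drop_append_of_le_length (by omega)]
  constructor
  · intro hok
    simp only [mslOk, beq_iff_eq] at hok
    rw [hdrop] at hok
    have hlen : (extra.take (c + 1)).length = (p.drop (p.length - c) ++ [x]).length := by
      rw [hok]
    simp at hlen
    have hcm : c < extra.length := by omega
    have htake : extra.take (c + 1) = extra.take c ++ [extra.getD c ""] := by
      rw [List.take_add_one]
      congr 1
      simp [List.getElem?_eq_getElem hcm]
    rw [htake] at hok
    have hlen2 : (extra.take c).length = (p.drop (p.length - c)).length := by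
      simp; omega
    obtain ⟨h1, h2⟩ := List.append_inj hok hlen2
    refine ⟨?_, hcm, ?_⟩
    · simp [mslOk, h1]
    · simpa using h2
  · rintro ⟨hok, hcm, hx⟩
    simp only [mslOk, beq_iff_eq] at hok ⊢
    rw [hdrop]
    have htake : extra.take (c + 1) = extra.take c ++ [extra.getD c ""] := by
      rw [List.take_add_one]
      congr 1
      simp [List.getElem?_eq_getElem hcm]
    rw [htake, hok, hx]

theorem msl_hyp (extra p : List String) (x : String) (c : Nat)
    (hc1 : c ≤ p.length) (hc2 : c ≤ extra.length) :
    (if mslOk extra p c then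
        (if c < extra.length ∧ extra.getD c "" = x then some (c + 1) else none)
      else none)
      = if mslOk extra (p ++ [x]) (c + 1) then some (c + 1) else none := by
  have h := msl_point extra p x c hc1 hc2
  by_cases h1 : mslOk extra p c = true
  · by_cases h2 : c < extra.length ∧ extra.getD c "" = x
    · have h3 := h.2 ⟨h1, h2.1, h2.2⟩
      simp only [h1, h3, if_true]
      rw [if_pos h2]
    · have h3 : ¬ mslOk extra (p ++ [x]) (c + 1) = true := fun hh => h2 ⟨(h.1 hh).2.1, (h.1 hh).2.2⟩
      simp only [h1, if_true, if_neg h3]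
      rw [if_neg h2]
  · have h3 : ¬ mslOk extra (p ++ [x]) (c + 1) = true := fun hh => h1 (h.1 hh).1
    simp only [if_neg h1, if_neg h3]

theorem msl_step (extra p : List String) (x : String) :
    mslBStep extra (List.filter (mslOk extra p) (mslDesc (min p.length extra.length))) x
      = List.filter (mslOk extra (p ++ [x])) (mslDesc (min (p.length + 1) extra.length)) := by
  set j := min p.length extra.length with hj
  have h0 : List.filter (mslOk extra p) (mslDesc j) ++ [0]
      = List.filter (mslOk extra p) (mslDesc j ++ [0]) := by
    simp [List.filter_append, mslOk_zero]
  have hkey := msl_key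
      (fun c => if c < extra.length ∧ extra.getD c "" = x then some (c + 1) else none)
      (mslOk extra p) (mslOk extra (p ++ [x])) (mslDesc j ++ [0]) ?_
  · have hmain : mslBStep extra (List.filter (mslOk extra p) (mslDesc j)) x
        = List.filter (mslOk extra (p ++ [x])) (mslDesc (j + 1)) := by
      rw [mslBStep, h0, hkey, mslDesc_map_succ]
    rw [hmain]
    by_cases hlt : p.length < extra.length
    · have : j + 1 = min (p.length + 1) extra.length := by omega
      rw [this]
    · have hj1 : j = extra.length := by omega
      have hj2 : min (p.length + 1) extra.length = extra.length := by omega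
      rw [hj1, hj2, mslDesc]
      have hfalse : mslOk extra (p ++ [x]) (extra.length + 1) = false := by
        by_contra hcontra
        have hok : mslOk extra (p ++ [x]) (extra.length + 1) = true := by
          cases hc : mslOk extra (p ++ [x]) (extra.length + 1)
          · exact absurd hc hcontra
          · rfl
        simp only [mslOk, beq_iff_eq] at hok
        have hlen : (extra.take (extra.length + 1)).length
            = ((p ++ [x]).drop ((p ++ [x]).length - (extra.length + 1))).length := by rw [hok]
        simp at hlen
        omega
      rw [List.filter_cons, hfalse]
      simp
  · intro c hcmem
    rcases List.mem_append.1 hcmem with hcd | hc0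
    · have hcj := mslDesc_mem_le hcd
      exact msl_hyp extra p x c (by omega) (by omega)
    · have hc : c = 0 := by simpa using hc0
      subst hc
      exact msl_hyp extra p x 0 (by omega) (by omega)

theorem msl_inv (extra : List String) :
    ∀ (bs p : List String),
      List.foldl (mslBStep extra)
          (List.filter (mslOk extra p) (mslDesc (min p.length extra.length))) bs
        = List.filter (mslOk extra (p ++ bs)) (mslDesc (min (p ++ bs).length extra.length)) := by
  intro bs
  induction bs with
  | nil => intro p; simp
  | cons b bs ih =>
    intro p
    rw [List.foldl_cons, msl_step]
    have h1 : p.length + 1 = (p ++ [b]).length := by simp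
    rw [h1, ih (p ++ [b])]
    simp

theorem msl_cands (base extra : List String) :
    List.foldl (mslBStep extra) [] base
      = List.filter (mslOk extra base) (mslDesc (min base.length extra.length)) := by
  have h := msl_inv extra base []
  simpa [mslDesc] using h

theorem msl_aloop (base extra : List String) :
    ∀ j : Nat, j ≤ base.length → j ≤ extra.length →
      mslALoop base extra (PySem.List.pyRange (j : Int) 0 (-1))
        = (((List.filter (mslOk extra base) (mslDesc j)).headD 0 : Nat) : Int) := by
  intro j
  induction j with
  | zero =>
    intro _ _
    rw [PySem.List.pyRange_neg_one_eq_nil (by norm_num)]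
    simp [mslALoop, mslDesc]
  | succ j ih =>
    intro hb he
    have hcast : ((j + 1 : Nat) : Int) - 1 = ((j : Nat) : Int) := by push_cast; ring
    have hcons : PySem.List.pyRange ((j + 1 : Nat) : Int) 0 (-1)
        = ((j + 1 : Nat) : Int) :: PySem.List.pyRange ((j : Nat) : Int) 0 (-1) := by
      rw [PySem.List.pyRange_neg_one_cons (by positivity), hcast]
    rw [hcons]
    simp only [mslALoop]
    have hs1 : PySem.List.slice base (some (-((j + 1 : Nat) : Int))) none
        = base.drop (base.length - (j + 1)) :=
      PySem.List.slice_from_neg_natCast base (j + 1) (by omega)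
    have hs2 : PySem.List.slice extra none (some ((j + 1 : Nat) : Int))
        = extra.take (j + 1) :=
      PySem.List.slice_to_natCast extra (j + 1)
    rw [hs1, hs2, mslDesc, List.filter_cons]
    by_cases hok : mslOk extra base (j + 1) = true
    · have hcond : base.drop (base.length - (j + 1)) = extra.take (j + 1) := by
        simp only [mslOk, beq_iff_eq] at hok
        exact hok.symm
      simp [hcond, hok]
    · have hcond : base.drop (base.length - (j + 1)) ≠ extra.take (j + 1) := by
        simp only [mslOk, beq_iff_eq] at hok
        exact fun hh => hok hh.symm
      have hokf : mslOk extra base (j + 1) = false := by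
        cases hc : mslOk extra base (j + 1)
        · rfl
        · exact absurd hc hok
      rw [hokf]
      simp only [if_neg hcond, Bool.false_eq_true, if_false]
      exact ih (by omega) (by omega)

-- ===== VERDICT (by name: the statement is the Claim_ definition above) =====
theorem merge_search_lines_py_spec : Claim_equal_merge_search_lines_py := by
  intro base extra _
  unfold Spec_merge_search_lines_py merge_search_lines_py merge_search_lines_py_alt
  by_cases hb : base = []
  · subst hb
    simp
  · by_cases he : extra = []
    · subst he
      rw [if_neg hb, if_pos rfl]
      rw [msl_cands]
      simp [mslDesc]
    · rw [if_neg hb, if_neg he]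
      have hmin : min (base.length : Int) (extra.length : Int)
          = ((min base.length extra.length : Nat) : Int) := by
        simp [Nat.cast_min]
      have hal := msl_aloop base extra (min base.length extra.length) (by omega) (by omega)
      simp only [hmin, hal, msl_cands, PySem.List.slice_from_natCast]
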